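-- pv_equiv track=rewrite | github.com/weronika-skiba/PrefixSpan | prefixspan.py | project_database
-- ===== SOURCE A (Python) =====
-- import copy
--
-- def project_database(database, prefix):
--     with_underscore = prefix.startswith('_')
--     if with_underscore:
--         prefix = prefix[1:]
--
--     projected_db = []
--
--     database_copy = copy.deepcopy(database)
--
--     for sequence in database_copy:
--         projected_sequence = []
--         first_occurrence_removed = False
--
--         for item in sequence:
--             if prefix in item and not first_occurrence_removed:
--                 index = item.index(prefix)
--
--                 if (item[0] == '_' and not with_underscore and index == 1) or \
--                 (item[0] != '_' and with_underscore):
--                     continue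
--
--                 item[index] = '_'
--                 modified_item = item[index:]
--
--                 if len(modified_item) > 1:
--                     projected_sequence.append(modified_item)
--
--                 first_occurrence_removed = True
--             elif first_occurrence_removed:
--                 projected_sequence.append(item)
--
--         if projected_sequence:
--             projected_db.append(projected_sequence)
--
--     return projected_db
-- ===== SOURCE B (Python) =====
-- def project_database(database, prefix):
--     with_underscore = prefix.startswith('_')
--     if with_underscore:
--         prefix = prefix[1:]
--
--     projected_db = []
--     for sequence in database:
--         # single reverse pass: walk the sequence right-to-left, maintaining
--         # `tail` = fresh copies of the items to the right of the cursor, and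
--         # `best` = projection for the leftmost eligible item seen so far
--         # (each eligible item overrides best, so the leftmost one wins).
--         tail = []
--         best = None
--         for item in reversed(sequence):
--             if prefix in item:
--                 i = item.index(prefix)
--                 skip = (item[0] == '_' and not with_underscore and i == 1) or \
--                        (item[0] != '_' and with_underscore)
--                 if not skip:
--                     head = ['_'] + item[i + 1:]
--                     best = ([head] if len(head) > 1 else []) + tail
--             tail = [list(item)] + tail
--         if best:
--             projected_db.append(best)
--     return projected_db
-- ===== Notes on version B (the rewrite author's own statement) =====
-- stated objective: alternative
-- what changed: B drops A's whole-database deepcopy and forward flag-driven scan: it walks each sequence right-to-left in one reverse pass, maintaining a copied tail and an overriding best projection so the leftmost eligible item wins, copying only what reaches the output.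
import Mathlib
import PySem

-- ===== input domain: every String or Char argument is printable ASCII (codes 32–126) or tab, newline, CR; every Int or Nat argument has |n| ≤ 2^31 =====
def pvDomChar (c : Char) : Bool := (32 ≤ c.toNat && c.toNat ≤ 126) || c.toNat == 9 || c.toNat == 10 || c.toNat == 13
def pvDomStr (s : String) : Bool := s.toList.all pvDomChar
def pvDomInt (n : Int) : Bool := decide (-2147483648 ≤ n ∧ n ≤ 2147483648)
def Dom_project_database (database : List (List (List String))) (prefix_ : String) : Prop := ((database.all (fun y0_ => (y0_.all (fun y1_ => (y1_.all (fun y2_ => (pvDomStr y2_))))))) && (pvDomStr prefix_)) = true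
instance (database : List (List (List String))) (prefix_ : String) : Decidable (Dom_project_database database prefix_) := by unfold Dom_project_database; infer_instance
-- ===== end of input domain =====

-- B replaces A's deepcopy + forward flag-driven scan by a single RIGHT-TO-LEFT pass per
-- sequence (copied tail + overriding `best`, so the leftmost eligible item wins); neither
-- program observably mutates its arguments (deepcopy is the identity on values here).

-- ===== PORT A =====
-- A's inner loop body: state = (projected_sequence, first_occurrence_removed)
def pvA_inner (prefix' : String) (wu : Bool)
    (st : List (List String) × Bool) (item : List String) : List (List String) × Bool :=
  let ps := st.1
  let removed := st.2
  if prefix' ∈ item ∧ removed = false then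
    -- item.index(prefix): guarded by membership, so index? is some
    let idx := (PySem.List.index? item prefix').getD 0
    -- item[0]: item is nonempty here since prefix' ∈ item
    let h := item.headD ""
    if (h == "_" && !wu && idx == 1) || (h != "_" && wu) then
      (ps, removed)
    else
      let item' := item.set idx "_"
      let modified := item'.drop idx   -- item[index:] after item[index] = '_'
      ((if modified.length > 1 then ps ++ [modified] else ps), true)
  else if removed then (ps ++ [item], removed)
  else (ps, removed)

def project_database (database : List (List (List String))) (prefix_ : String) : List (List (List String)) :=
  let wu := PySem.Str.startswith prefix_ "_"
  let prefix' := if wu then PySem.Str.slice prefix_ (some 1) none else prefix_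
  database.foldl (fun acc sequence =>
    let ps := (sequence.foldl (pvA_inner prefix' wu) ([], false)).1
    if ps ≠ [] then acc ++ [ps] else acc) []

-- ===== PORT B =====
-- B's reverse-pass body: state = (tail = copies of items right of the cursor, best)
-- (list(item) is a fresh copy in Python; on values it is the identity, so tail' = item :: tail)
def pvB_step (pat : String) (wu : Bool)
    (st : List (List String) × Option (List (List String))) (item : List String) :
    List (List String) × Option (List (List String)) :=
  let best :=
    match PySem.List.index? item pat with   -- `pat in item` + item.index(pat)
    | some i =>
      if (item.headD "" == "_" && !wu && i == 1) || (item.headD "" != "_" && wu) then st.2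
      else
        let head := "_" :: item.drop (i + 1)      -- ['_'] + item[i+1:]
        some ((if head.length > 1 then [head] else []) ++ st.1)
    | none => st.2
  (item :: st.1, best)

def project_database_alt (database : List (List (List String))) (prefix_ : String) : List (List (List String)) :=
  let wu := PySem.Str.startswith prefix_ "_"
  let pat := if wu then PySem.Str.slice prefix_ (some 1) none else prefix_
  database.foldl (fun out sequence =>
    match (sequence.reverse.foldl (pvB_step pat wu) ([], none)).2 with
    | some ps => if ps ≠ [] then out ++ [ps] else out   -- `if best:`
    | none => out) []

-- ===== PRECONDITION & SPEC =====
def Spec_project_database (database : List (List (List String))) (prefix_ : String) (out : List (List (List String))) : Prop := out = project_database_alt database prefix_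
instance (database : List (List (List String))) (prefix_ : String) (out : List (List (List String))) : Decidable (Spec_project_database database prefix_ out) := by unfold Spec_project_database; infer_instance

-- ===== CLAIM (what is proved, stated in full; the proofs are below) =====
def Claim_equal_project_database : Prop := ∀ (database : List (List (List String))) (prefix_ : String), Dom_project_database database prefix_ → Spec_project_database database prefix_ (project_database database prefix_)

-- ===== LEMMAS AND PROOFS =====

-- proof-side characterisation: the first item containing `pat` whose skip-guard fails,
-- returned with the index of `pat` in it and the items after it
def pvFind (pat : String) (wu : Bool) :
    List (List String) → Option (List String × Nat × List (List String))
  | [] => none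
  | item :: rest =>
    match PySem.List.index? item pat with
    | some idx =>
      if (item.headD "" == "_" && !wu && idx == 1) || (item.headD "" != "_" && wu) then
        pvFind pat wu rest
      else some (item, idx, rest)
    | none => pvFind pat wu rest

def pvProj (item : List String) (idx : Nat) : List (List String) :=
  if ("_" :: item.drop (idx + 1)).length > 1 then ["_" :: item.drop (idx + 1)] else []

-- once the flag is set, A's inner loop just appends every remaining item
theorem pvA_inner_done (prefix' : String) (wu : Bool) (ps : List (List String))
    (items : List (List String)) :
    items.foldl (pvA_inner prefix' wu) (ps, true) = (ps ++ items, true) := by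
  induction items generalizing ps with
  | nil => simp
  | cons x xs ih =>
    simp only [List.foldl_cons, pvA_inner]
    simp [ih]

-- after setting position idx to '_', the suffix from idx is '_' followed by the old tail
theorem pvDropSet (item : List String) (idx : Nat) (h : idx < item.length) :
    (item.set idx "_").drop idx = "_" :: item.drop (idx + 1) := by
  rw [List.drop_eq_getElem_cons (by simpa using h)]
  simp [List.drop_set]

-- A's inner loop from the initial state is characterised by pvFind
theorem pvInner_eq_find (pat : String) (wu : Bool) (seq : List (List String)) :
    seq.foldl (pvA_inner pat wu) ([], false) =
      match pvFind pat wu seq with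
      | none => ([], false)
      | some (item, idx, rest) => (pvProj item idx ++ rest, true) := by
  induction seq with
  | nil => rfl
  | cons item rest ih =>
    rw [List.foldl_cons]
    rcases hidx : PySem.List.index? item pat with _ | idx
    · have hmem : pat ∉ item := (PySem.List.index?_eq_none_iff item pat).mp hidx
      have h1 : pvA_inner pat wu ([], false) item = ([], false) := by
        simp [pvA_inner, hmem]
      have h2 : pvFind pat wu (item :: rest) = pvFind pat wu rest := by
        simp only [pvFind]; rw [hidx]
      rw [h1, h2, ih]
    · have hmem : pat ∈ item :=
        (PySem.List.index?_isSome_iff item pat).mp (by rw [hidx]; rfl)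
      obtain ⟨hk, -, -⟩ := PySem.List.getElem_of_index?_eq_some hidx
      by_cases hg : ((item.headD "" == "_" && !wu && idx == 1) ||
                     (item.headD "" != "_" && wu)) = true
      · have h1 : pvA_inner pat wu ([], false) item = ([], false) := by
          simp only [pvA_inner]
          rw [hidx]
          simp only [Option.getD_some]
          rw [if_pos (show pat ∈ item ∧ True from ⟨hmem, trivial⟩), if_pos hg]
        have h2 : pvFind pat wu (item :: rest) = pvFind pat wu rest := by
          simp only [pvFind]
          rw [hidx]
          exact if_pos hg
        rw [h1, h2, ih]
      · have h1 : pvA_inner pat wu ([], false) item = (pvProj item idx, true) := by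
          simp only [pvA_inner]
          rw [hidx]
          simp only [Option.getD_some]
          rw [if_pos (show pat ∈ item ∧ True from ⟨hmem, trivial⟩), if_neg hg,
              pvDropSet item idx hk]
          simp [pvProj]
        have h2 : pvFind pat wu (item :: rest) = some (item, idx, rest) := by
          simp only [pvFind]
          rw [hidx]
          exact if_neg hg
        rw [h1, h2]
        exact pvA_inner_done pat wu _ rest

-- B's reverse pass, written as a foldr, is characterised by the same pvFind
theorem pvB_foldr (pat : String) (wu : Bool) (seq : List (List String))
    (t0 : List (List String)) (b0 : Option (List (List String))) :
    seq.foldr (fun item st => pvB_step pat wu st item) (t0, b0) =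
      (seq ++ t0,
       match pvFind pat wu seq with
       | some (item, idx, rest) => some (pvProj item idx ++ (rest ++ t0))
       | none => b0) := by
  induction seq with
  | nil => rfl
  | cons item rest ih =>
    rw [List.foldr_cons, ih]
    rcases hidx : PySem.List.index? item pat with _ | idx
    · have h2 : pvFind pat wu (item :: rest) = pvFind pat wu rest := by
        simp only [pvFind]; rw [hidx]
      simp only [pvB_step]
      rw [hidx, h2]
      simp
    · by_cases hg : ((item.headD "" == "_" && !wu && idx == 1) ||
                     (item.headD "" != "_" && wu)) = true
      · have h2 : pvFind pat wu (item :: rest) = pvFind pat wu rest := by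
          simp only [pvFind]; rw [hidx]; exact if_pos hg
        simp only [pvB_step]
        rw [hidx, h2]
        dsimp only
        rw [if_pos hg]
        rfl
      · have h2 : pvFind pat wu (item :: rest) = some (item, idx, rest) := by
          simp only [pvFind]; rw [hidx]; exact if_neg hg
        simp only [pvB_step]
        rw [hidx, h2]
        dsimp only
        rw [if_neg hg]
        simp [pvProj]

-- the two outer folds agree from any accumulator
theorem pvOuter (pat : String) (wu : Bool) (db : List (List (List String)))
    (acc : List (List (List String))) :
    db.foldl (fun acc sequence =>
      let ps := (sequence.foldl (pvA_inner pat wu) ([], false)).1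
      if ps ≠ [] then acc ++ [ps] else acc) acc =
    db.foldl (fun out sequence =>
      match (sequence.reverse.foldl (pvB_step pat wu) ([], none)).2 with
      | some ps => if ps ≠ [] then out ++ [ps] else out
      | none => out) acc := by
  induction db generalizing acc with
  | nil => rfl
  | cons seq db ih =>
    rw [List.foldl_cons, List.foldl_cons]
    have hb : (seq.reverse.foldl (pvB_step pat wu) ([], none)).2 =
        match pvFind pat wu seq with
        | some (item, idx, rest) => some (pvProj item idx ++ rest)
        | none => none := by
      rw [List.foldl_reverse]
      have := pvB_foldr pat wu seq [] none
      simp only [List.append_nil] at this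
      rw [this]
    rw [hb, pvInner_eq_find]
    rcases pvFind pat wu seq with _ | ⟨item, idx, rest⟩
    · exact ih _
    · exact ih _

-- ===== VERDICT (by name: the statement is the Claim_ definition above) =====
theorem project_database_spec : Claim_equal_project_database := by
  intro database prefix_ _
  unfold Spec_project_database project_database project_database_alt
  exact pvOuter _ _ database []
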